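-- pv_equiv track=rewrite | github.com/WojciechBednarczyk/Scrambling | server.py | descramV34
-- ===== SOURCE A (Python) =====
-- from operator import xor
--
-- def reverse_async_clock(frame, data, bit):
--     if bit[1] != -1:                                      # Sprawdzanie czy używamy obu bitów, potrzebne dla niektórych scramblerów
--         temp = xor(frame[bit[0]-1], frame[bit[1]-1])      # XOR dla bit[0] i bit[1],
--     else:                                                 # Jeśli tylko 1 bit, przypisujemy wartość temu bitowi
--         temp = frame[bit[0]-1]
--     frame.pop()                                         # Usuwanie ostatniego elementu ramki
--     frame.insert(0, data)                               # Dodawanie na początek ramki bitu sygnału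
--     xor_value = xor(data, temp)                         # XOR dla bitu synganłu wejściowego i poprzedniego xora
--     return xor_value                                    # Zwrócenie zdekodowanego sygnału
--
-- def descramV34(bits):
--     dataLength = len(bits)
--     frameV34 = [1, 0, 0, 1, 0, 0, 0, 1, 0, 0, 1, 0, 0, 0, 0, 1, 0, 1, 0, 1, 1, 0, 1]  # Ramka
--     scramBits = [18, 23]                                                   # Bity używane w sprzężeniu zwrotym, dla V34 bit 18 i 23
--     output_signal = []                                                     # Tablica na dane wyjściowe
--     for i in range(0, dataLength):
--         clock_result = reverse_async_clock(frameV34, bits[i], scramBits)   # Operacja operacji dekodowania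
--         output_signal.append(clock_result)                                 # Dodanie wyników do tablicy danych wyjściowych
--     return output_signal
-- ===== SOURCE B (Python) =====
-- def descramV34(bits):
--     frameV34 = [1, 0, 0, 1, 0, 0, 0, 1, 0, 0, 1, 0, 0, 0, 0, 1, 0, 1, 0, 1, 1, 0, 1]
--     out = []
--     for i in range(len(bits)):
--         t18 = bits[i - 18] if i >= 18 else frameV34[17 - i]
--         t23 = bits[i - 23] if i >= 23 else frameV34[22 - i]
--         out.append(bits[i] ^ (t18 ^ t23))
--     return out
-- ===== Notes on version B (the rewrite author's own statement) =====
-- stated objective: alternative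
-- what changed: B removes the mutable 23-bit shift register entirely and computes each output bit directly by indexing into the prior input bits (bits[i-18], bits[i-23]) or, for the first 18/23 steps, into the fixed initial frame constant.
import Mathlib
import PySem

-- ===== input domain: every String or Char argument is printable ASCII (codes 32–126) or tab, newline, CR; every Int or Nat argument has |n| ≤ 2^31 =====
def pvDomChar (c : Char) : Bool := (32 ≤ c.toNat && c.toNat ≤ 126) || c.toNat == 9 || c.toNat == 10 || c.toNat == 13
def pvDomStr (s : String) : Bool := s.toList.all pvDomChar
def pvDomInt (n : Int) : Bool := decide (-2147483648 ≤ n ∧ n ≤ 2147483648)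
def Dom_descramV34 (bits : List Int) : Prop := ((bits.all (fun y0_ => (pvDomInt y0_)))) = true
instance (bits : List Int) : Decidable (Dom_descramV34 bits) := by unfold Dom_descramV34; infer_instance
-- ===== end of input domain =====

-- B replaces A's mutable 23-bit shift register with direct indexing into the input
-- (bits[i-18]/bits[i-23], or the fixed initial frame for the first 18/23 steps): alternative decomposition, no state.

-- the V.34 initial frame shared literal
def frV34 : List Int := [1, 0, 0, 1, 0, 0, 0, 1, 0, 0, 1, 0, 0, 0, 0, 1, 0, 1, 0, 1, 1, 0, 1]

-- ===== PORT A =====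
-- A's helper mutates `frame` (pop + insert at front); modelled purely: returns (new frame, xor value).
-- frame[bit[0]-1] etc. use pyGet? with getD 0 (the index is in range on every call A makes).
def reverseAsyncClock (frame : List Int) (data : Int) (bit : List Int) : List Int × Int :=
  let temp :=
    if (PySem.List.pyGet? bit 1).getD 0 ≠ -1 then
      PySem.Int.bxor ((PySem.List.pyGet? frame ((PySem.List.pyGet? bit 0).getD 0 - 1)).getD 0)
                     ((PySem.List.pyGet? frame ((PySem.List.pyGet? bit 1).getD 0 - 1)).getD 0)
    else
      (PySem.List.pyGet? frame ((PySem.List.pyGet? bit 0).getD 0 - 1)).getD 0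
  let frame' := frame.dropLast          -- frame.pop()
  let frame'' := data :: frame'         -- frame.insert(0, data)
  (frame'', PySem.Int.bxor data temp)

def descramV34 (bits : List Int) : List Int :=
  let dataLength := bits.length
  let frameV34 := frV34
  let scramBits : List Int := [18, 23]
  let r := (List.range dataLength).foldl
    (fun (st : List Int × List Int) i =>
      let c := reverseAsyncClock st.1 ((PySem.List.pyGet? bits (Int.ofNat i)).getD 0) scramBits
      (c.1, st.2 ++ [c.2]))
    (frameV34, [])
  r.2

-- ===== PORT B =====
def descramV34_alt (bits : List Int) : List Int :=
  let frameV34 := frV34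
  (List.range bits.length).map (fun i =>
    let t18 := if 18 ≤ i then (PySem.List.pyGet? bits (Int.ofNat i - 18)).getD 0
               else (PySem.List.pyGet? frameV34 (17 - Int.ofNat i)).getD 0
    let t23 := if 23 ≤ i then (PySem.List.pyGet? bits (Int.ofNat i - 23)).getD 0
               else (PySem.List.pyGet? frameV34 (22 - Int.ofNat i)).getD 0
    PySem.Int.bxor ((PySem.List.pyGet? bits (Int.ofNat i)).getD 0) (PySem.Int.bxor t18 t23))

-- ===== PRECONDITION & SPEC =====
def Spec_descramV34 (bits : List Int) (out : List Int) : Prop := out = descramV34_alt bits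
instance (bits : List Int) (out : List Int) : Decidable (Spec_descramV34 bits out) := by unfold Spec_descramV34; infer_instance

-- ===== CLAIM (what is proved, stated in full; the proofs are below) =====
def Claim_equal_descramV34 : Prop := ∀ (bits : List Int), Dom_descramV34 bits → Spec_descramV34 bits (descramV34 bits)

-- ===== LEMMAS AND PROOFS =====

-- A's frame after i steps: the last i inputs (newest first) followed by the initial frame, truncated to 23.
def frameOf (bits : List Int) (i : Nat) : List Int :=
  ((bits.take i).reverse ++ frV34).take 23

lemma frameOf_zero (bits : List Int) : frameOf bits 0 = frV34 := by
  simp only [frameOf, List.take_zero, List.reverse_nil, List.nil_append]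
  decide

lemma frameOf_get (bits : List Int) (i j : Nat) (hi : i ≤ bits.length) (hj : j < 23) :
    PySem.List.pyGet? (frameOf bits i) (j : Int) =
      if j < i then PySem.List.pyGet? bits ((i : Int) - (j : Int) - 1)
      else PySem.List.pyGet? frV34 ((j : Int) - (i : Int)) := by
  have hrev : (bits.take i).reverse.length = i := by simp; omega
  rw [PySem.List.pyGet?_natCast, frameOf, List.getElem?_take_of_lt hj,
      List.getElem?_append]
  by_cases hji : j < i
  · rw [if_pos hji, if_pos (by omega : j < (bits.take i).reverse.length)]
    rw [List.getElem?_reverse (by simp; omega)]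
    have hidx : (List.take i bits).length - 1 - j = i - 1 - j := by simp; omega
    rw [hidx, List.getElem?_take_of_lt (by omega),
        show ((i : Int) - (j : Int) - 1) = ((i - 1 - j : Nat) : Int) by omega,
        PySem.List.pyGet?_natCast]
  · rw [if_neg hji, if_neg (by omega), hrev,
        show ((j : Int) - (i : Int)) = ((j - i : Nat) : Int) by omega,
        PySem.List.pyGet?_natCast]


lemma frameOf_succ (bits : List Int) (i : Nat) (hi : i < bits.length) :
    ((PySem.List.pyGet? bits (Int.ofNat i)).getD 0) :: (frameOf bits i).dropLast
      = frameOf bits (i + 1) := by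
  have h1 : (PySem.List.pyGet? bits (Int.ofNat i)).getD 0 = bits[i] := by
    simp [Int.ofNat_eq_natCast, PySem.List.pyGet?_natCast, List.getElem?_eq_getElem hi]
  have hlen : ((bits.take i).reverse ++ frV34).length = i + 23 := by
    simp [frV34]; omega
  have h2 : (frameOf bits i).dropLast = ((bits.take i).reverse ++ frV34).take 22 := by
    rw [frameOf, List.dropLast_eq_take, List.take_take, List.length_take, hlen]
    have : min (min 23 (i + 23) - 1) 23 = 22 := by omega
    rw [this]
  have h3 : bits.take (i+1) = bits.take i ++ [bits[i]] := by
    rw [List.take_add_one, List.getElem?_eq_getElem hi]; rfl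
  rw [h1, h2, frameOf, h3, List.reverse_append]
  simp


-- the element B produces at index i
def bElem (bits : List Int) (i : Nat) : Int :=
  let t18 := if 18 ≤ i then (PySem.List.pyGet? bits (Int.ofNat i - 18)).getD 0
             else (PySem.List.pyGet? frV34 (17 - Int.ofNat i)).getD 0
  let t23 := if 23 ≤ i then (PySem.List.pyGet? bits (Int.ofNat i - 23)).getD 0
             else (PySem.List.pyGet? frV34 (22 - Int.ofNat i)).getD 0
  PySem.Int.bxor ((PySem.List.pyGet? bits (Int.ofNat i)).getD 0) (PySem.Int.bxor t18 t23)

lemma step_eq (bits : List Int) (i : Nat) (hi : i < bits.length) :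
    reverseAsyncClock (frameOf bits i) ((PySem.List.pyGet? bits (Int.ofNat i)).getD 0) [18, 23]
      = (frameOf bits (i + 1), bElem bits i) := by
  have h17 := frameOf_get bits i 17 hi.le (by omega)
  have h22 := frameOf_get bits i 22 hi.le (by omega)
  norm_num at h17 h22
  have e18 : (PySem.List.pyGet? (frameOf bits i) 17).getD 0 =
      (if 18 ≤ i then (PySem.List.pyGet? bits ((i : Int) - 18)).getD 0
       else (PySem.List.pyGet? frV34 (17 - (i : Int))).getD 0) := by
    rw [h17]; by_cases h : 18 ≤ i
    · rw [if_pos (by omega : 17 < i), if_pos h,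
          show ((i : Int) - 17 - 1) = (i : Int) - 18 by ring]
    · rw [if_neg (by omega : ¬ 17 < i), if_neg h]
  have e23 : (PySem.List.pyGet? (frameOf bits i) 22).getD 0 =
      (if 23 ≤ i then (PySem.List.pyGet? bits ((i : Int) - 23)).getD 0
       else (PySem.List.pyGet? frV34 (22 - (i : Int))).getD 0) := by
    rw [h22]; by_cases h : 23 ≤ i
    · rw [if_pos (by omega : 22 < i), if_pos h,
          show ((i : Int) - 22 - 1) = (i : Int) - 23 by ring]
    · rw [if_neg (by omega : ¬ 22 < i), if_neg h]
  have hs := frameOf_succ bits i hi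
  simp only [Int.ofNat_eq_natCast, PySem.List.pyGet?_natCast] at hs ⊢
  unfold reverseAsyncClock bElem
  simp only [Int.ofNat_eq_natCast, PySem.List.pyGet?_natCast]
  norm_num
  rw [e18, e23]
  exact ⟨hs, rfl⟩


lemma loop_eq (bits : List Int) :
    ∀ (n i : Nat) (acc : List Int), i + n ≤ bits.length →
      ((List.range' i n).foldl
        (fun (st : List Int × List Int) k =>
          let c := reverseAsyncClock st.1 ((PySem.List.pyGet? bits (Int.ofNat k)).getD 0) [18, 23]
          (c.1, st.2 ++ [c.2]))
        (frameOf bits i, acc)).2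
      = acc ++ (List.range' i n).map (bElem bits) := by
  intro n
  induction n with
  | zero => intro i acc _; simp
  | succ n ih =>
    intro i acc h
    rw [List.range'_succ]
    simp only [List.foldl_cons, List.map_cons]
    rw [step_eq bits i (by omega)]
    rw [ih (i + 1) (acc ++ [bElem bits i]) (by omega)]
    simp

-- ===== VERDICT (by name: the statement is the Claim_ definition above) =====
theorem descramV34_spec : Claim_equal_descramV34 := by
  intro bits _
  unfold Spec_descramV34 descramV34 descramV34_alt
  simp only []
  rw [List.range_eq_range', ← frameOf_zero bits]
  rw [loop_eq bits bits.length 0 [] (by omega)]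
  simp [bElem, ← List.range_eq_range', frameOf_zero]
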